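-- pv_equiv track=rewrite | github.com/linusqzdeng/python-snippets | hacker_rank/no_idea.py | happiness
-- ===== SOURCE A (Python) =====
-- def happiness(a, b, n):
--     happy = 0
--     unhappy = 0     # define the origin score of happiness
--
--     for i in a:
--         if i in n:
--             happy += 1
--
--     for j in b:
--         if j in n:
--             unhappy -= 1
--
--     return happy + unhappy
-- ===== SOURCE B (Python) =====
-- def happiness(a, b, n):
--     ca = {}
--     for x in a:
--         ca[x] = ca.get(x, 0) + 1
--     cb = {}
--     for x in b:
--         cb[x] = cb.get(x, 0) + 1
--     total = 0
--     for v in set(n):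
--         total += ca.get(v, 0) - cb.get(v, 0)
--     return total
-- ===== Notes on version B (the rewrite author's own statement) =====
-- stated objective: alternative
-- what changed: Instead of scanning a and b and testing membership in n each time, B builds frequency dicts of a and b once and makes a single pass over the distinct elements of n, summing count_a(v) - count_b(v).
import Mathlib
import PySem

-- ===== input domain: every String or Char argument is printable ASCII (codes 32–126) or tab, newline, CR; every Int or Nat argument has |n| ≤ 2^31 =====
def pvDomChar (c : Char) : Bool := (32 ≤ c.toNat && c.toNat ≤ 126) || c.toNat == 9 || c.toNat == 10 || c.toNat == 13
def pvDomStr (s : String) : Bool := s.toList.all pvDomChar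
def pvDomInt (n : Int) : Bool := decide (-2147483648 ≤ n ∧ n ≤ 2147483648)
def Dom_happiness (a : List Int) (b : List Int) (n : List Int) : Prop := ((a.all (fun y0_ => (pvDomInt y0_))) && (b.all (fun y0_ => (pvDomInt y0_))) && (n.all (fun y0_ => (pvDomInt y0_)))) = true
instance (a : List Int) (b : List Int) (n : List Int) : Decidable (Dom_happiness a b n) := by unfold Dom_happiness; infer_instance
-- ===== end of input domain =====

-- B replaces A's membership scans with frequency dicts for a and b and one pass over the
-- distinct elements of n, summing count_a(v) - count_b(v) (objective: alternative).

-- ===== PORT A =====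
def happiness (a : List Int) (b : List Int) (n : List Int) : Int :=
  let happy : Int := a.foldl (fun happy i => if n.contains i then happy + 1 else happy) 0
  let unhappy : Int := b.foldl (fun unhappy j => if n.contains j then unhappy - 1 else unhappy) 0
  happy + unhappy

-- ===== PORT B =====
def happiness_alt (a : List Int) (b : List Int) (n : List Int) : Int :=
  let ca : PySem.Dict Int Int := a.foldl (fun d x => d.insert x (d.getD x 0 + 1)) PySem.Dict.empty
  let cb : PySem.Dict Int Int := b.foldl (fun d x => d.insert x (d.getD x 0 + 1)) PySem.Dict.empty
  (PySem.Set.ofList n).foldl (fun total v => total + (ca.getD v 0 - cb.getD v 0)) 0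

-- ===== PRECONDITION & SPEC =====
def Spec_happiness (a : List Int) (b : List Int) (n : List Int) (out : Int) : Prop := out = happiness_alt a b n
instance (a : List Int) (b : List Int) (n : List Int) (out : Int) : Decidable (Spec_happiness a b n out) := by unfold Spec_happiness; infer_instance

-- ===== CLAIM (what is proved, stated in full; the proofs are below) =====
def Claim_equal_happiness : Prop := ∀ (a : List Int) (b : List Int) (n : List Int), Dom_happiness a b n → Spec_happiness a b n (happiness a b n)

-- ===== LEMMAS AND PROOFS =====

-- the counting dict built by B's first two loops looks up to the occurrence count
theorem getD_countDict (l : List Int) (d : PySem.Dict Int Int) (v : Int) :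
    (l.foldl (fun d x => d.insert x (d.getD x 0 + 1)) d).getD v 0 = d.getD v 0 + l.count v := by
  induction l generalizing d with
  | nil => simp
  | cons x l ih =>
    simp only [List.foldl_cons, ih, PySem.Dict.getD_insert, List.count_cons]
    by_cases h : v = x <;> simp [h] <;> omega

-- A's subtracting loop is a countP
theorem foldl_if_sub_one (l : List Int) (p : Int → Bool) (acc : Int) :
    l.foldl (fun acc x => if p x then acc - 1 else acc) acc = acc - l.countP p := by
  induction l generalizing acc with
  | nil => simp
  | cons x l ih =>
    simp only [List.foldl_cons, List.countP_cons, ih]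
    by_cases h : p x
    · simp [h]; omega
    · simp [h]

theorem sum_indicator (S : List Int) (hS : S.Nodup) (x : Int) :
    (S.map (fun v => if v == x then (1 : Int) else 0)).sum = if S.contains x then 1 else 0 := by
  induction S with
  | nil => simp
  | cons s S ih =>
    simp only [List.nodup_cons] at hS
    simp only [List.map_cons, List.sum_cons, ih hS.2, List.contains_cons]
    by_cases h : s = x
    · subst h
      simp [hS.1]
    · simp [Ne.symm h, h]

theorem sum_map_sub' (S : List Int) (f g : Int → Int) :
    (S.map (fun v => f v - g v)).sum = (S.map f).sum - (S.map g).sum := by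
  induction S with
  | nil => simp
  | cons s S ih => simp only [List.map_cons, List.sum_cons, ih]; ring

theorem sum_map_add' (S : List Int) (f g : Int → Int) :
    (S.map (fun v => f v + g v)).sum = (S.map f).sum + (S.map g).sum := by
  induction S with
  | nil => simp
  | cons s S ih => simp only [List.map_cons, List.sum_cons, ih]; ring

-- per-occurrence counting: summing counts over the distinct values equals one countP
theorem sum_counts (l S : List Int) (hS : S.Nodup) :
    (S.map (fun v => (l.count v : Int))).sum = (l.countP (fun x => S.contains x) : Int) := by
  induction l with
  | nil => simp
  | cons x l ih =>
    have h1 : (S.map (fun v => ((x :: l).count v : Int)))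
        = S.map (fun v => (l.count v : Int) + (if v == x then (1 : Int) else 0)) := by
      have : (fun v => ((x :: l).count v : Int))
          = fun v => (l.count v : Int) + (if v == x then (1 : Int) else 0) := by
        funext v
        by_cases h : v = x
        · simp [h]
        · simp [h, Ne.symm h]
      rw [this]
    rw [h1, sum_map_add', ih, sum_indicator S hS x, List.countP_cons]
    split <;> simp


-- ===== VERDICT (by name: the statement is the Claim_ definition above) =====
theorem happiness_spec : Claim_equal_happiness := by
  intro a b n _
  unfold Spec_happiness
  simp only [happiness, happiness_alt]
  rw [PySem.List.foldl_if_add_one, foldl_if_sub_one, PySem.List.foldl_add]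
  have hS : (PySem.Set.ofList n).Nodup := PySem.Set.nodup_ofList n
  have hmem : ∀ x : Int, List.contains (PySem.Set.ofList n) x = n.contains x := by
    intro x
    simp [PySem.Set.mem_ofList]
  have hmap : (fun v =>
      ((a.foldl (fun d x => d.insert x (d.getD x 0 + 1)) PySem.Dict.empty).getD v 0 -
       (b.foldl (fun d x => d.insert x (d.getD x 0 + 1)) PySem.Dict.empty).getD v 0))
      = fun v => (a.count v : Int) - (b.count v : Int) := by
    funext v
    rw [getD_countDict, getD_countDict]
    simp
  rw [hmap, sum_map_sub', sum_counts a _ hS, sum_counts b _ hS,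
]
  have hP : ∀ (l : List Int),
      l.countP (fun x => List.contains (PySem.Set.ofList n) x) = l.countP n.contains :=
    fun l => List.countP_congr (fun x _ => by rw [hmem x])
  rw [hP a, hP b]
  omega
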